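-- pv_equiv track=rewrite | github.com/NieXiaoFeng0805/pythonProject | 笔试/字符移位-腾讯.py | move_str
-- ===== SOURCE A (Python) =====
-- def move_str(sub_str):
--     """
--     转为列表后再进行遍历
--     碰到大写字母则记录下标，向字符串末尾添加该大写字母并将原来位置删除
--     大写 65-90 小写 97-122
--     :param n:
--     :param sub_list:
--     :return:
--     """
--     n = len(sub_str)
--     sub_list = list(sub_str)
--     for i in range(n):
--         if 65 <= ord(sub_list[i]) <= 90:  # 大写字母
--             sub_list.append(sub_list[i])  # 添加
--             sub_list[i] = ''  # 删除
--             i -= 1 if i != 0 else 0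
--     return "".join(sub_list)
-- ===== SOURCE B (Python) =====
-- def move_str(sub_str):
--     keep = [c for c in sub_str if not (65 <= ord(c) <= 90)]
--     ups = [c for c in sub_str if 65 <= ord(c) <= 90]
--     return "".join(keep + ups)
-- ===== Notes on version B (the rewrite author's own statement) =====
-- stated objective: simpler
-- what changed: A mutates a char list in place (blanking each ASCII uppercase slot and appending the letter at the end) inside an index loop; B builds the two groups directly with two order-preserving filters on ord(c) in 65..90 and concatenates them.
import Mathlib
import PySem

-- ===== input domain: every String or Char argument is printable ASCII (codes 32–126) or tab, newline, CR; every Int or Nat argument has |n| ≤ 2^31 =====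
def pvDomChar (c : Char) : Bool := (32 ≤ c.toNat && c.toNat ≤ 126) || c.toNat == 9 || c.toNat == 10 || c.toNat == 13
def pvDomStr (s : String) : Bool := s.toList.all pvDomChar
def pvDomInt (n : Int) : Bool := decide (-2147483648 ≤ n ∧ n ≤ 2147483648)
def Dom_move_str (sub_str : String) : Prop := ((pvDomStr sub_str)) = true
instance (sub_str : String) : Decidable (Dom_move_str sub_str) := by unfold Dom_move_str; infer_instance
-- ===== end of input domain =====

-- B replaces A's in-place blank-and-append index loop by two order-preserving filters; return values proved equal.
-- ===== PORT A =====
-- single-character string for a list element (Python: list(sub_str) gives 1-char strings)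
def pvToS (c : Char) : String := String.ofList [c]
-- Python's `65 <= ord(s) <= 90` on a list element (only ever reached on a 1-char string)
def pvIsUpS (s : String) : Bool := match s.toList with
  | c :: _ => decide (65 ≤ c.toNat ∧ c.toNat ≤ 90)
  | [] => false
-- the loop body: append sub_list[i] then blank index i (the `i -= 1 …` line rebinds the
-- loop variable and has no effect in Python, so it is not represented)
def pvStep (sl : List String) (i : Int) : List String :=
  let s := PySem.List.pyGetD sl i ""
  if pvIsUpS s then PySem.List.pySetD (sl ++ [s]) i "" else sl
def move_str (sub_str : String) : String :=
  let n := sub_str.toList.length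
  let sub_list := sub_str.toList.map pvToS
  let final := (PySem.List.pyRange 0 n 1).foldl pvStep sub_list
  PySem.Str.join "" final

-- ===== PORT B =====
def pvIsUp (c : Char) : Bool := decide (65 ≤ c.toNat ∧ c.toNat ≤ 90)
def move_str_alt (sub_str : String) : String :=
  let keep := sub_str.toList.filter (fun c => ¬ pvIsUp c)
  let ups := sub_str.toList.filter pvIsUp
  String.ofList (keep ++ ups)

-- ===== PRECONDITION & SPEC =====
def Spec_move_str (sub_str : String) (out : String) : Prop := out = move_str_alt sub_str
instance (sub_str : String) (out : String) : Decidable (Spec_move_str sub_str out) := by unfold Spec_move_str; infer_instance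

-- ===== CLAIM (what is proved, stated in full; the proofs are below) =====
def Claim_equal_move_str : Prop := ∀ (sub_str : String), Dom_move_str sub_str → Spec_move_str sub_str (move_str sub_str)

-- ===== LEMMAS AND PROOFS =====

-- blanked-or-kept entry for position of char c after it has been processed
def pvF (c : Char) : String := if pvIsUp c then "" else pvToS c

theorem pvSetMid {α : Type} (A : List α) (x : α) (R : List α) (v : α) (n : Nat)
    (hn : A.length = n) : (A ++ x :: R).set n v = A ++ v :: R := by
  subst hn; rw [List.set_append]; simp

theorem pvLoopInv (cs : List Char) (k : Nat) (hk : k ≤ cs.length) :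
    (PySem.List.pyRange 0 k 1).foldl pvStep (cs.map pvToS) =
      (cs.take k).map pvF ++ (cs.drop k).map pvToS ++ ((cs.take k).filter pvIsUp).map pvToS := by
  induction k with
  | zero => simp [PySem.List.pyRange]
  | succ k ih =>
    have hk' : k < cs.length := by omega
    have hr : PySem.List.pyRange 0 ((k:Int)+1) 1 = PySem.List.pyRange 0 k 1 ++ [(k:Int)] :=
      PySem.List.pyRange_one_succ_right (by omega)
    have hcast : ((k+1 : Nat) : Int) = (k:Int) + 1 := by push_cast; ring
    rw [hcast, hr, List.foldl_append, ih (by omega)]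
    have hA : ((cs.take k).map pvF).length = k := by simp; omega
    have hdrop : cs.drop k = cs[k] :: cs.drop (k+1) := List.drop_eq_getElem_cons hk'
    have htake : cs.take (k+1) = cs.take k ++ [cs[k]] := by
      rw [List.take_succ]; simp [List.getElem?_eq_getElem hk']
    set c := cs[k] with hc
    have hstate : (cs.take k).map pvF ++ (cs.drop k).map pvToS ++ ((cs.take k).filter pvIsUp).map pvToS
        = (cs.take k).map pvF ++ (pvToS c :: ((cs.drop (k+1)).map pvToS ++ ((cs.take k).filter pvIsUp).map pvToS)) := by
      rw [hdrop]; simp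
    have hget : PySem.List.pyGetD ((cs.take k).map pvF ++ (pvToS c :: ((cs.drop (k+1)).map pvToS ++ ((cs.take k).filter pvIsUp).map pvToS))) (k:Int) "" = pvToS c := by
      have hmin : min k cs.length = k := by omega
      rw [PySem.List.pyGetD_natCast, List.getD, List.getElem?_append_right (by omega)]
      simp [hmin]
    have hup : pvIsUpS (pvToS c) = pvIsUp c := by
      simp [pvIsUpS, pvToS, pvIsUp]
    rw [List.foldl_cons, List.foldl_nil, hstate]
    unfold pvStep
    simp only [hget, hup]
    by_cases h : pvIsUp c
    · simp only [h, if_pos]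
      rw [PySem.List.pySetD_natCast]
      have hL : ((cs.take k).map pvF ++ pvToS c :: ((cs.drop (k+1)).map pvToS ++ ((cs.take k).filter pvIsUp).map pvToS)) ++ [pvToS c]
          = (cs.take k).map pvF ++ pvToS c :: ((cs.drop (k+1)).map pvToS ++ ((cs.take k).filter pvIsUp).map pvToS ++ [pvToS c]) := by
        simp
      rw [hL, pvSetMid _ _ _ _ k hA, htake]
      simp [pvF, h, List.filter_append]
    · simp only [h, if_neg, Bool.false_eq_true, not_false_iff]
      rw [htake]
      simp [pvF, h, List.filter_append]

theorem pvJoinFlatten (parts : List (List Char)) :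
    PySem.Chars.join [] parts = parts.flatten := by
  induction parts with
  | nil => simp [PySem.Chars.join_nil]
  | cons p ps ih => cases ps with
    | nil => simp [PySem.Chars.join, List.intercalate]
    | cons q qs => simp only [PySem.Chars.join_cons_cons, ih, List.flatten_cons]; simp

theorem pvFlatF (cs : List Char) :
    ((cs.map pvF).map String.toList).flatten = cs.filter (fun c => ¬ pvIsUp c) := by
  induction cs with
  | nil => simp
  | cons c cs ih =>
    simp only [List.map_cons, List.flatten_cons, ih, List.filter_cons]
    by_cases h : pvIsUp c
    · simp [pvF, h]
    · simp [pvF, h, pvToS]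

theorem pvFlatToS (us : List Char) :
    ((us.map pvToS).map String.toList).flatten = us := by
  induction us with
  | nil => simp
  | cons c cs ih => simp only [List.map_cons, List.flatten_cons, ih]; simp [pvToS]

-- ===== VERDICT (by name: the statement is the Claim_ definition above) =====
theorem move_str_spec : Claim_equal_move_str := by
  intro s _
  show move_str s = move_str_alt s
  simp only [move_str, move_str_alt]
  rw [← String.toList_inj]
  rw [pvLoopInv s.toList s.toList.length (le_refl _)]
  rw [PySem.Str.toList_join]
  simp only [List.take_length, List.drop_length, List.map_nil, List.append_nil]
  have hnil : "".toList = ([] : List Char) := by decide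
  rw [hnil, pvJoinFlatten]
  simp only [List.map_append, List.flatten_append, pvFlatF, pvFlatToS, String.toList_ofList]
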